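-- pv_equiv track=rewrite | github.com/DICKY1987/complete-ai-development-pipeline-canonical-phase-plan | Multi-Document Versioning Automation final_spec_docs/tools/spec_indexer/indexer.py | compute_paragraphs
-- ===== SOURCE A (Python) =====
-- def compute_paragraphs(text: str):
--     paragraphs = []
--     lines = text.splitlines()
--     start = None
--     buffer = []
--     for i, line in enumerate(lines, start=1):
--         if not line.strip():
--             if start is not None:
--                 paragraphs.append((start, i - 1, "\n".join(buffer)))
--                 start = None
--                 buffer = []
--             continue
--         if start is None:
--             start = i
--         buffer.append(line)
--     if start is not None:
--         paragraphs.append((start, len(lines), "\n".join(buffer)))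
--     return paragraphs
-- ===== SOURCE B (Python) =====
-- def compute_paragraphs(text: str):
--     lines = text.splitlines()
--     n = len(lines)
--     paragraphs = []
--     i = 0
--     while i < n:
--         if lines[i].strip():
--             j = i + 1
--             while j < n and lines[j].strip():
--                 j += 1
--             paragraphs.append((i + 1, j, "\n".join(lines[i:j])))
--             i = j
--         else:
--             i += 1
--     return paragraphs
-- ===== Notes on version B (the rewrite author's own statement) =====
-- stated objective: alternative
-- what changed: Replaced A's start/buffer state machine with post-loop flush by a two-index run scanner: an outer index skips blank lines and an inner index finds the end of each non-blank run, emitting each paragraph from a slice in one place.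
import Mathlib
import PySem

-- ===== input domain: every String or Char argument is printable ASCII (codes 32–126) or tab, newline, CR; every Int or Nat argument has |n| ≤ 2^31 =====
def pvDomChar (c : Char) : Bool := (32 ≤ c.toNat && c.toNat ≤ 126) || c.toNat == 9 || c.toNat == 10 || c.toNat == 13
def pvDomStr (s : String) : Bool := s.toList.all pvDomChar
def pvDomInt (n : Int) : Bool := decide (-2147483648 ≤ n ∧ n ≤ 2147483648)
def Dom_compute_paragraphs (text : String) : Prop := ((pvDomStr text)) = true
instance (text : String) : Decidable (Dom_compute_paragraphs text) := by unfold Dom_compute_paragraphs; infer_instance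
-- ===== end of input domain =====

-- B replaces A's start/buffer state machine (with its post-loop flush) by a two-index run
-- scanner emitting each paragraph from a slice in one place; same O(n) cost ("alternative").

-- ===== PORT A =====
-- "not line.strip()": the line is blank (empty after stripping whitespace)
def pvBlank (l : String) : Bool := (PySem.Str.strip l).toList.isEmpty

-- the for-loop of A as structural recursion over the lines, state (start, buffer, paragraphs);
-- n = len(lines), used by the post-loop flush
def aGo (ls : List String) (i : Int) (start : Option Int) (buffer : List String)
    (paragraphs : List (Int × Int × String)) (n : Int) : List (Int × Int × String) :=
  match ls with
  | [] =>
    match start with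
    | some s => paragraphs ++ [(s, n, PySem.Str.join "\n" buffer)]
    | none => paragraphs
  | l :: rest =>
    if pvBlank l then
      match start with
      | some s => aGo rest (i + 1) none [] (paragraphs ++ [(s, i - 1, PySem.Str.join "\n" buffer)]) n
      | none => aGo rest (i + 1) none buffer paragraphs n
    else
      match start with
      | none => aGo rest (i + 1) (some i) (buffer ++ [l]) paragraphs n
      | some s => aGo rest (i + 1) (some s) (buffer ++ [l]) paragraphs n

def compute_paragraphs (text : String) : List (Int × Int × String) :=
  let lines := PySem.Str.splitlines text
  aGo lines 1 none [] [] (lines.length : Int)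

-- ===== PORT B =====
-- inner while loop of Source B: advance j while j < n and lines[j] is non-blank
def bScan (lines : List String) (n j : Nat) : Nat :=
  if j < n then
    if pvBlank (lines.getD j "") then j else bScan lines n (j + 1)
  else j
termination_by n - j

theorem bScan_ge (lines : List String) (n j : Nat) : j ≤ bScan lines n j := by
  unfold bScan
  split
  · split
    · exact le_refl _
    · exact le_trans (Nat.le_succ j) (bScan_ge lines n (j + 1))
  · exact le_refl _
termination_by n - j

-- outer while loop of Source B
def bGo (lines : List String) (n i : Nat) : List (Int × Int × String) :=
  if h : i < n then
    if pvBlank (lines.getD i "") then bGo lines n (i + 1)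
    else
      let j := bScan lines n (i + 1)
      ((i : Int) + 1, (j : Int),
        PySem.Str.join "\n" (PySem.List.slice lines (some (i : Int)) (some (j : Int)))) ::
        bGo lines n j
  else []
termination_by n - i
decreasing_by
  · omega
  · have := bScan_ge lines n (i + 1); omega

def compute_paragraphs_alt (text : String) : List (Int × Int × String) :=
  let lines := PySem.Str.splitlines text
  bGo lines lines.length 0

-- ===== PRECONDITION & SPEC =====
def Spec_compute_paragraphs (text : String) (out : List (Int × Int × String)) : Prop := out = compute_paragraphs_alt text
instance (text : String) (out : List (Int × Int × String)) : Decidable (Spec_compute_paragraphs text out) := by unfold Spec_compute_paragraphs; infer_instance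

-- ===== CLAIM (what is proved, stated in full; the proofs are below) =====
def Claim_equal_compute_paragraphs : Prop := ∀ (text : String), Dom_compute_paragraphs text → Spec_compute_paragraphs text (compute_paragraphs text)

-- ===== LEMMAS AND PROOFS =====

-- a list-shaped reformulation of B's run scanner, the common ground of the proof
def bList (ls : List String) (i : Int) : List (Int × Int × String) :=
  match ls with
  | [] => []
  | l :: rest =>
    if pvBlank l then bList rest (i + 1)
    else
      let tw := rest.takeWhile (fun x => !pvBlank x)
      (i, i + tw.length, PySem.Str.join "\n" (l :: tw)) ::
        bList (rest.dropWhile (fun x => !pvBlank x)) (i + tw.length + 1)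
termination_by ls.length
decreasing_by
  · simp
  · have := List.length_dropWhile_le (fun x => !pvBlank x) rest
    simp; omega

theorem takeWhile_eq_take (p : String → Bool) (xs : List String) :
    xs.takeWhile p = xs.take (xs.takeWhile p).length := by
  induction xs with
  | nil => simp
  | cons x xs ih =>
    by_cases h : p x
    · rw [List.takeWhile_cons_of_pos h]
      simp only [List.length_cons, List.take_succ_cons]
      rw [← ih]
    · rw [List.takeWhile_cons_of_neg h]
      simp

theorem dropWhile_eq_drop (p : String → Bool) (xs : List String) :
    xs.dropWhile p = xs.drop (xs.takeWhile p).length := by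
  induction xs with
  | nil => simp
  | cons x xs ih =>
    by_cases h : p x
    · simp [List.takeWhile_cons, List.dropWhile_cons, h, ih]
    · simp [List.takeWhile_cons, List.dropWhile_cons, h]

theorem bScan_eq (lines : List String) (j : Nat) (hj : j ≤ lines.length) :
    bScan lines lines.length j =
      j + ((lines.drop j).takeWhile (fun x => !pvBlank x)).length := by
  by_cases h : j < lines.length
  · have hdrop : lines.drop j = lines[j] :: lines.drop (j + 1) := List.drop_eq_getElem_cons h
    have hget : lines.getD j "" = lines[j] := List.getD_eq_getElem lines "" h
    unfold bScan
    rw [if_pos h, hget, hdrop]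
    by_cases hb : pvBlank lines[j]
    · simp [hb, List.takeWhile_cons]
    · have ih := bScan_eq lines (j + 1) h
      rw [if_neg hb, ih]
      rw [List.takeWhile_cons_of_pos (by simp [hb])]
      simp
      omega
  · have hj' : j = lines.length := le_antisymm hj (Nat.le_of_not_lt h)
    subst hj'
    unfold bScan
    simp
termination_by lines.length - j

theorem bGo_eq_bList (lines : List String) (i : Nat) (hi : i ≤ lines.length) :
    bGo lines lines.length i = bList (lines.drop i) ((i : Int) + 1) := by
  by_cases h : i < lines.length
  · have hdrop : lines.drop i = lines[i] :: lines.drop (i + 1) := List.drop_eq_getElem_cons h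
    have hget : lines.getD i "" = lines[i] := List.getD_eq_getElem lines "" h
    rw [bGo, dif_pos h, hget, hdrop]
    by_cases hb : pvBlank lines[i]
    · rw [if_pos hb, bList, if_pos hb]
      have ih := bGo_eq_bList lines (i + 1) h
      rw [ih]
      norm_cast
    · rw [if_neg hb, bList, if_neg hb]
      have hscan := bScan_eq lines (i + 1) h
      set tw := (lines.drop (i + 1)).takeWhile (fun x => !pvBlank x) with htw
      have hlen : tw.length ≤ lines.length - (i + 1) := by
        calc tw.length ≤ (lines.drop (i + 1)).length :=
              (List.takeWhile_sublist _).length_le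
          _ = lines.length - (i + 1) := List.length_drop
      have hslice : PySem.List.slice lines (some (i : Int)) (some ((i + 1 + tw.length : Nat) : Int))
          = lines[i] :: tw := by
        rw [PySem.List.slice_natCast, hdrop]
        have : i + 1 + tw.length - i = tw.length + 1 := by omega
        rw [this, List.take_succ_cons]
        rw [htw, ← takeWhile_eq_take]
      have ih := bGo_eq_bList lines (i + 1 + tw.length) (by omega)
      have hdw : lines.drop (i + 1 + tw.length)
          = (lines.drop (i + 1)).dropWhile (fun x => !pvBlank x) := by
        rw [dropWhile_eq_drop, ← htw, ← List.drop_drop]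
      simp only [hscan, hslice, ih, hdw]
      push_cast
      rfl
  · have : i = lines.length := by omega
    subst this
    rw [bGo]
    simp [bList]
termination_by lines.length - i

theorem aGo_eq_bList (ls : List String) :
    (∀ (i : Int) acc (n : Int), n = i - 1 + ls.length →
        aGo ls i none [] acc n = acc ++ bList ls i) ∧
    (∀ (i s : Int) buf acc (n : Int), n = i - 1 + ls.length →
        aGo ls i (some s) buf acc n =
          acc ++ (s, i - 1 + (ls.takeWhile (fun x => !pvBlank x)).length,
              PySem.Str.join "\n" (buf ++ ls.takeWhile (fun x => !pvBlank x))) ::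
            bList (ls.dropWhile (fun x => !pvBlank x))
              (i + (ls.takeWhile (fun x => !pvBlank x)).length)) := by
  induction ls with
  | nil =>
    constructor
    · intro i acc n hn
      simp [aGo, bList]
    · intro i s buf acc n hn
      simp only [aGo, bList, List.takeWhile_nil, List.dropWhile_nil, List.append_nil,
        List.length_nil, Nat.cast_zero, add_zero]
      rw [hn]
      simp
    | cons l rest ih =>
    constructor
    · intro i acc n hn
      simp only [aGo]
      by_cases hb : pvBlank l
      · rw [if_pos hb]
        rw [ih.1 (i + 1) acc n (by simp at hn; push_cast; omega)]
        rw [bList, if_pos hb]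
      · rw [if_neg hb]
        rw [List.nil_append]
        rw [ih.2 (i + 1) i [l] acc n (by simp at hn; push_cast; omega)]
        rw [bList, if_neg hb]
        simp only [List.singleton_append]
        push_cast
        ring_nf
    · intro i s buf acc n hn
      simp only [aGo]
      by_cases hb : pvBlank l
      · rw [if_pos hb]
        rw [ih.1 (i + 1) _ n (by simp at hn; push_cast; omega)]
        rw [List.takeWhile_cons_of_neg (by simp [hb]), List.dropWhile_cons_of_neg (by simp [hb])]
        rw [bList, if_pos hb]
        simp
      · rw [if_neg hb]
        rw [ih.2 (i + 1) s (buf ++ [l]) acc n (by simp at hn; push_cast; omega)]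
        rw [List.takeWhile_cons_of_pos (by simp [hb]), List.dropWhile_cons_of_pos (by simp [hb])]
        simp only [List.append_assoc, List.singleton_append, List.length_cons]
        push_cast
        ring_nf

-- ===== VERDICT (by name: the statement is the Claim_ definition above) =====
theorem compute_paragraphs_spec : Claim_equal_compute_paragraphs := by
  intro text _
  unfold Spec_compute_paragraphs compute_paragraphs compute_paragraphs_alt
  have hA := (aGo_eq_bList (PySem.Str.splitlines text)).1 1 [] ((PySem.Str.splitlines text).length : Int) (by push_cast; ring)
  have hB := bGo_eq_bList (PySem.Str.splitlines text) 0 (Nat.zero_le _)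
  simp at hA hB ⊢
  rw [hA, hB]
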